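-- pv_equiv track=rewrite | github.com/gitkit11/botV02 | signal_engine.py | _count_streak
-- ===== SOURCE A (Python) =====
-- def _count_streak(form_str: str) -> int:
--     """Текущая серия побед подряд (с конца)."""
--     streak = 0
--     for c in reversed(form_str.upper()):
--         if c == "W":
--             streak += 1
--         else:
--             break
--     return streak
-- ===== SOURCE B (Python) =====
-- def _count_streak(form_str: str) -> int:
--     """Текущая серия побед подряд (с конца)."""
--     return len(form_str) - len(form_str.upper().rstrip("W"))
-- ===== Notes on version B (the rewrite author's own statement) =====
-- stated objective: simpler
-- what changed: Replaces the explicit reverse scan with a break by a loop-free arithmetic formulation: the trailing-W streak is the length lost when rstrip('W') removes the trailing run.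
import Mathlib
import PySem

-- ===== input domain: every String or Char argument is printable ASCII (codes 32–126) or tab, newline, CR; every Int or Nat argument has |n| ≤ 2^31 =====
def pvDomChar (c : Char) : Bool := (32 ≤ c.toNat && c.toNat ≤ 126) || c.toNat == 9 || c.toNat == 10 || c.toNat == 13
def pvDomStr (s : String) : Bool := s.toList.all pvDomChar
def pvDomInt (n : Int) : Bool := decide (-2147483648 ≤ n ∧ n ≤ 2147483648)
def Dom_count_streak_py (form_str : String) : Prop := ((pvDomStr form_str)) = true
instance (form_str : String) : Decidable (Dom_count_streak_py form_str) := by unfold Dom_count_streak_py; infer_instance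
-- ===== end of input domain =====

-- B is a loop-free arithmetic formulation (length lost when rstrip('W') removes the trailing run); same value, no speed claim.

-- ===== PORT A =====
-- the 'for c in reversed(...)' loop with break, carrying the streak accumulator
def pvStreakLoop : List Char → Int → Int
  | [], streak => streak
  | c :: rest, streak => if c == 'W' then pvStreakLoop rest (streak + 1) else streak

def count_streak_py (form_str : String) : Int :=
  pvStreakLoop (PySem.Str.upper form_str).toList.reverse 0

-- ===== PORT B =====
-- hand port of str.rstrip("W") (single strip char): drop the trailing run of 'W'; exact for this one-character strip set
def pvRstripW (cs : List Char) : List Char := (cs.reverse.dropWhile (· == 'W')).reverse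

def count_streak_py_alt (form_str : String) : Int :=
  (PySem.Str.len form_str : Int) - (pvRstripW (PySem.Str.upper form_str).toList).length

-- ===== PRECONDITION & SPEC =====
def Spec_count_streak_py (form_str : String) (out : Int) : Prop := out = count_streak_py_alt form_str
instance (form_str : String) (out : Int) : Decidable (Spec_count_streak_py form_str out) := by unfold Spec_count_streak_py; infer_instance

-- ===== CLAIM (what is proved, stated in full; the proofs are below) =====
def Claim_equal_count_streak_py : Prop := ∀ (form_str : String), Dom_count_streak_py form_str → Spec_count_streak_py form_str (count_streak_py form_str)

-- ===== LEMMAS AND PROOFS =====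
theorem pvStreakLoop_eq (l : List Char) (streak : Int) :
    pvStreakLoop l streak = streak + (l.takeWhile (· == 'W')).length := by
  induction l generalizing streak with
  | nil => simp [pvStreakLoop]
  | cons c rest ih =>
    simp only [pvStreakLoop, List.takeWhile]
    by_cases h : c == 'W'
    · simp [h, ih]; ring
    · simp [h]

theorem upper_length (s : String) :
    (PySem.Str.upper s).toList.length = s.toList.length := by
  simp [PySem.Str.toList_upper, PySem.Chars.upper]

-- ===== VERDICT (by name: the statement is the Claim_ definition above) =====
theorem count_streak_py_spec : Claim_equal_count_streak_py := by
  intro s _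
  unfold Spec_count_streak_py count_streak_py count_streak_py_alt pvRstripW
  rw [pvStreakLoop_eq]
  have h := List.takeWhile_append_dropWhile (p := (· == 'W'))
      (l := (PySem.Str.upper s).toList.reverse)
  have hlen : ((PySem.Str.upper s).toList.reverse.takeWhile (· == 'W')).length
      + ((PySem.Str.upper s).toList.reverse.dropWhile (· == 'W')).length
      = s.toList.length := by
    have h2 := congrArg List.length h
    rw [List.length_append, List.length_reverse, upper_length] at h2
    omega
  have hsl : PySem.Str.len s = s.toList.length := by
    simp [PySem.Str.len_eq]
  simp only [List.length_reverse, hsl]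
  omega
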